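-- pv_equiv track=rewrite | github.com/ckoons/BubbleSpacetimeTheory | play/toy_269_topology_guided_solver.py | build_vig
-- ===== SOURCE A (Python) =====
-- from collections import defaultdict
--
-- def build_vig(n, clauses):
--     """Variable Interaction Graph from CNF clauses."""
--     edges = set()
--     adj = defaultdict(set)
--     for clause in clauses:
--         vs = [lit[0] for lit in clause]
--         for i in range(len(vs)):
--             for j in range(i+1, len(vs)):
--                 u, v = min(vs[i], vs[j]), max(vs[i], vs[j])
--                 if u != v:
--                     edges.add((u, v))
--                     adj[u].add(v)
--                     adj[v].add(u)
--     return edges, adj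
-- ===== SOURCE B (Python) =====
-- from collections import defaultdict
--
-- def build_vig(n, clauses):
--     """Variable Interaction Graph from CNF clauses.
--
--     Deduplicates each clause's variables first (order-preserving), then
--     enumerates pairs among the distinct variables only -- no equality test
--     needed -- and finally derives the adjacency map from the finished edge set.
--     """
--     edges = set()
--     for clause in clauses:
--         vs = list(dict.fromkeys(lit[0] for lit in clause))
--         while vs:
--             u, vs = vs[0], vs[1:]
--             for w in vs:
--                 edges.add((u, w) if u < w else (w, u))
--     adj = defaultdict(set)
--     for u, v in edges:
--         adj[u].add(v)
--         adj[v].add(u)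
--     return edges, adj
-- ===== Notes on version B (the rewrite author's own statement) =====
-- stated objective: faster
-- what changed: A enumerates all index pairs of the raw (possibly repeated) clause variables, filtering u!=v, and grows edges and adjacency together in the inner loop; B first deduplicates each clause's variables order-preservingly, enumerates pairs among distinct variables only (so the u!=v test disappears), and builds the adjacency map afterwards in a separate pass over the finished deduplicated edge set, so pair work is quadratic in distinct variables per clause and adjacency updates run once per distinct edge.
import Mathlib
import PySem

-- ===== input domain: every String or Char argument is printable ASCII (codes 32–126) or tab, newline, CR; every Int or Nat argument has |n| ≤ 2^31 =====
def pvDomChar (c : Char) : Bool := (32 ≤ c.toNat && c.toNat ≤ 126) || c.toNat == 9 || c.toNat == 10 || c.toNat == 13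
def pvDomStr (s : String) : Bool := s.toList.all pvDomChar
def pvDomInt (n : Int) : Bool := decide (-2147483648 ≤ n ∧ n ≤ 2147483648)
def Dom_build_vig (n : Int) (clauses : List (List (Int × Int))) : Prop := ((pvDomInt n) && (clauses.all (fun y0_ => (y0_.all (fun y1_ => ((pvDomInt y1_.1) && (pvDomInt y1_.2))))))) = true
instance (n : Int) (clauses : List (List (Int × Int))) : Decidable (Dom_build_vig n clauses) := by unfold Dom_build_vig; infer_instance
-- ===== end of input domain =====

-- B deduplicates each clause's variables first (order-preserving), enumerates pairs among
-- the distinct variables only — so the u != v test disappears — and builds the adjacency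
-- dict in a separate pass over the finished edge set (measured faster in a timing run).

-- ===== PORT A =====
-- A-side helpers: the body of A's innermost loop (u, v = min, max; if u != v: add edge, grow adj),
-- acting on one raw pair (x, y) = (vs[i], vs[j]), and the body of A's 'for clause in clauses' loop
def stepA (st : PySem.Set (Int × Int) × PySem.Dict Int (PySem.Set Int)) (x y : Int) :
    PySem.Set (Int × Int) × PySem.Dict Int (PySem.Set Int) :=
  let u := min x y
  let v := max x y
  if u ≠ v then
    (st.1.add (u, v), (st.2.modify u [] (fun s => s.add v)).modify v [] (fun s => s.add u))
  else st

def buildVigClause (st : PySem.Set (Int × Int) × PySem.Dict Int (PySem.Set Int))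
    (clause : List (Int × Int)) : PySem.Set (Int × Int) × PySem.Dict Int (PySem.Set Int) :=
  let vs := clause.map (fun lit => lit.1)
  (PySem.List.pyRange 0 (PySem.List.len vs)).foldl (fun st i =>
    (PySem.List.pyRange (i + 1) (PySem.List.len vs)).foldl (fun st j =>
      stepA st (PySem.List.pyGetD vs i 0) (PySem.List.pyGetD vs j 0)) st) st

def build_vig (n : Int) (clauses : List (List (Int × Int))) : (List (Int × Int)) × (List (Int × List Int)) :=
  let st := clauses.foldl buildVigClause (PySem.Set.empty, PySem.Dict.empty)
  (st.1, st.2.items)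

-- ===== PORT B =====
-- 'while vs: u, vs = vs[0], vs[1:]; for w in vs: edges.add(…)' from Source B (no u != w test:
-- vs holds the clause's DISTINCT variables, 'list(dict.fromkeys(…))' = PySem.List.dedup)
def altClauseEdges (es : PySem.Set (Int × Int)) : List Int → PySem.Set (Int × Int)
  | [] => es
  | u :: vs =>
      altClauseEdges (vs.foldl (fun es w => es.add (if u < w then (u, w) else (w, u))) es) vs

-- body of Source B's second loop: 'adj[u].add(v); adj[v].add(u)'
def adjInsert (adj : PySem.Dict Int (PySem.Set Int)) (e : Int × Int) : PySem.Dict Int (PySem.Set Int) :=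
  (adj.modify e.1 [] (fun s => s.add e.2)).modify e.2 [] (fun s => s.add e.1)

def build_vig_alt (n : Int) (clauses : List (List (Int × Int))) : (List (Int × Int)) × (List (Int × List Int)) :=
  let edges := clauses.foldl
    (fun es clause => altClauseEdges es (PySem.List.dedup (clause.map (fun lit => lit.1))))
    PySem.Set.empty
  let adj := edges.foldl adjInsert PySem.Dict.empty
  (edges, adj.items)

-- ===== PRECONDITION & SPEC =====
def Spec_build_vig (n : Int) (clauses : List (List (Int × Int))) (out : (List (Int × Int)) × (List (Int × List Int))) : Prop := out = build_vig_alt n clauses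
instance (n : Int) (clauses : List (List (Int × Int))) (out : (List (Int × Int)) × (List (Int × List Int))) : Decidable (Spec_build_vig n clauses out) := by unfold Spec_build_vig; infer_instance

-- ===== CLAIM (what is proved, stated in full; the proofs are below) =====
def Claim_equal_build_vig : Prop := ∀ (n : Int) (clauses : List (List (Int × Int))), Dom_build_vig n clauses → Spec_build_vig n clauses (build_vig n clauses)

-- ===== LEMMAS AND PROOFS =====

-- the normalized pair and the two edge-only steps: A's (with the u != v guard, on raw
-- variable lists) and B's (guardless, on deduplicated lists)
def normPair (x y : Int) : Int × Int := if x < y then (x, y) else (y, x)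

def stepB (es : PySem.Set (Int × Int)) (x y : Int) : PySem.Set (Int × Int) :=
  if x ≠ y then es.add (normPair x y) else es

def stepB' (es : PySem.Set (Int × Int)) (x y : Int) : PySem.Set (Int × Int) :=
  es.add (normPair x y)

-- fold a pair-step over all unordered pairs of vs, head-first
def pairFold {σ : Type} (f : σ → Int → Int → σ) : List Int → σ → σ
  | [], st => st
  | u :: vs, st => pairFold f vs (vs.foldl (fun st w => f st u w) st)

def buildAdj (E : List (Int × Int)) : PySem.Dict Int (PySem.Set Int) :=
  E.foldl adjInsert PySem.Dict.empty

theorem normPair_comm (x y : Int) : normPair x y = normPair y x := by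
  unfold normPair
  rcases lt_trichotomy x y with h | h | h
  · rw [if_pos h, if_neg (not_lt_of_gt h)]
  · subst h; rfl
  · rw [if_neg (not_lt_of_gt h), if_pos h]

-- ----- adjacency-from-edges machinery (shared by the final assembly) -----

theorem nodup_keys_adjInsert (d : PySem.Dict Int (PySem.Set Int)) (e : Int × Int)
    (h : d.keys.Nodup) : (adjInsert d e).keys.Nodup := by
  unfold adjInsert
  rw [PySem.Dict.keys_modify]
  apply PySem.Dict.nodup_keys_insert
  rw [PySem.Dict.keys_modify]
  exact PySem.Dict.nodup_keys_insert _ _ _ h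

theorem nodup_keys_foldl_adjInsert (E : List (Int × Int)) :
    ∀ (d : PySem.Dict Int (PySem.Set Int)), d.keys.Nodup → (E.foldl adjInsert d).keys.Nodup := by
  induction E with
  | nil => intro d h; exact h
  | cons e E ih => intro d h; exact ih _ (nodup_keys_adjInsert d e h)

theorem nodup_keys_buildAdj (E : List (Int × Int)) : (buildAdj E).keys.Nodup :=
  nodup_keys_foldl_adjInsert E _ PySem.Dict.nodup_keys_empty

theorem insert_self_of_get? (d : PySem.Dict Int (PySem.Set Int)) (k : Int) (v : PySem.Set Int)
    (hnd : d.keys.Nodup) (h : d.get? k = some v) : d.insert k v = d := by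
  have hc : d.contains k = true := by rw [PySem.Dict.contains_eq_isSome_get?, h]; rfl
  show PySem.Dict.insert d k v = d
  rw [PySem.Dict.insert, if_pos hc]
  apply PySem.Dict.ext
  show d.items.map _ = d.items
  rw [List.map_congr_left (g := id), List.map_id]
  rintro ⟨p1, p2⟩ hp
  by_cases hk : p1 = k
  · have : d.get? p1 = some p2 := PySem.Dict.get?_of_mem_items d hp hnd
    rw [hk, h] at this
    simp [hk, Option.some_inj.mp this]
  · simp [hk]

theorem get?_of_mem_getD (d : PySem.Dict Int (PySem.Set Int)) (u v : Int)
    (h : v ∈ d.getD u []) : d.get? u = some (d.getD u []) := by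
  cases hg : d.get? u with
  | none => rw [PySem.Dict.getD_eq_get?_getD, hg] at h; simp at h
  | some s => rw [PySem.Dict.getD_eq_get?_getD, hg]; rfl

theorem modify_noop (d : PySem.Dict Int (PySem.Set Int)) (u v : Int)
    (hnd : d.keys.Nodup) (h : v ∈ d.getD u []) :
    d.modify u [] (fun s => s.add v) = d := by
  show d.insert u ((d.getD u []).add v) = d
  rw [PySem.Set.add_of_mem h]
  exact insert_self_of_get? d u _ hnd (get?_of_mem_getD d u v h)

theorem adjInsert_noop (d : PySem.Dict Int (PySem.Set Int)) (u v : Int)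
    (hnd : d.keys.Nodup) (h1 : v ∈ d.getD u []) (h2 : u ∈ d.getD v []) :
    adjInsert d (u, v) = d := by
  unfold adjInsert
  simp only
  rw [modify_noop d u v hnd h1, modify_noop d v u hnd h2]

theorem mem_getD_adjInsert_mono (d : PySem.Dict Int (PySem.Set Int)) (e : Int × Int) (u v : Int)
    (h : v ∈ d.getD u []) : v ∈ (adjInsert d e).getD u [] := by
  unfold adjInsert
  simp only [PySem.Dict.getD_modify]
  split_ifs with h1 h2 <;> simp_all [PySem.Set.mem_add]

theorem mem_getD_adjInsert_self (d : PySem.Dict Int (PySem.Set Int)) (u v : Int) :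
    v ∈ (adjInsert d (u, v)).getD u [] ∧ u ∈ (adjInsert d (u, v)).getD v [] := by
  unfold adjInsert
  by_cases huv : u = v
  · subst huv; simp [PySem.Set.mem_add]
  · constructor <;>
      simp [PySem.Dict.getD_modify, huv, Ne.symm huv, PySem.Set.mem_add]

theorem mem_getD_foldl_mono (E : List (Int × Int)) :
    ∀ (d : PySem.Dict Int (PySem.Set Int)) (u v : Int), v ∈ d.getD u [] →
      v ∈ ((E.foldl adjInsert d).getD u []) := by
  induction E with
  | nil => intro d u v h; exact h
  | cons e E ih => intro d u v h; exact ih _ u v (mem_getD_adjInsert_mono d e u v h)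

theorem mem_getD_foldl (E : List (Int × Int)) :
    ∀ (d : PySem.Dict Int (PySem.Set Int)) (u v : Int), (u, v) ∈ E →
      v ∈ ((E.foldl adjInsert d).getD u []) ∧ u ∈ ((E.foldl adjInsert d).getD v []) := by
  induction E with
  | nil => intro d u v h; simp at h
  | cons e E ih =>
      intro d u v h
      rcases List.mem_cons.mp h with h | h
      · subst h
        rcases mem_getD_adjInsert_self d u v with ⟨h1, h2⟩
        exact ⟨mem_getD_foldl_mono E _ u v h1, mem_getD_foldl_mono E _ v u h2⟩
      · exact ih _ u v h

theorem buildAdj_add (E : List (Int × Int)) (u v : Int) :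
    buildAdj (PySem.Set.add E (u, v)) = adjInsert (buildAdj E) (u, v) := by
  by_cases hmem : (u, v) ∈ E
  · rw [PySem.Set.add_of_mem hmem]
    rcases mem_getD_foldl E PySem.Dict.empty u v hmem with ⟨h1, h2⟩
    exact (adjInsert_noop _ u v (nodup_keys_buildAdj E) h1 h2).symm
  · have : PySem.Set.add E (u, v) = E ++ [(u, v)] := by
      rw [PySem.Set.add, if_neg]
      simp at *
      exact hmem
    rw [this]
    unfold buildAdj
    rw [List.foldl_append]
    rfl

-- one-pair coherence: A's combined step tracks the guarded edge step with buildAdj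
theorem step_coherent (es : PySem.Set (Int × Int)) (x y : Int) :
    stepA (es, buildAdj es) x y = (stepB es x y, buildAdj (stepB es x y)) := by
  unfold stepA stepB normPair
  rcases lt_trichotomy x y with h | h | h
  · rw [min_eq_left h.le, max_eq_right h.le]
    simp only [ne_eq, h.ne, not_false_iff, if_true, if_pos h]
    rw [buildAdj_add]
    rfl
  · subst h; simp
  · rw [min_eq_right h.le, max_eq_left h.le]
    simp only [ne_eq, h.ne, h.ne', not_false_iff, if_true, if_neg (not_lt_of_gt h)]
    rw [buildAdj_add]
    rfl

-- generic lifting of a coherent step through foldl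
theorem foldl_lift {α S D : Type} (F : S × D → α → S × D) (G : S → α → S) (bd : S → D)
    (h : ∀ es x, F (es, bd es) x = (G es x, bd (G es x))) :
    ∀ (l : List α) (es : S), l.foldl F (es, bd es) = (l.foldl G es, bd (l.foldl G es)) := by
  intro l
  induction l with
  | nil => intro es; rfl
  | cons a l ih => intro es; simp only [List.foldl_cons, h es a]; exact ih (G es a)

theorem pairFold_lift {S D : Type} (F : S × D → Int → Int → S × D) (G : S → Int → Int → S) (bd : S → D)
    (h : ∀ es x y, F (es, bd es) x y = (G es x y, bd (G es x y))) :
    ∀ (vs : List Int) (es : S),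
      pairFold F vs (es, bd es) = (pairFold G vs es, bd (pairFold G vs es)) := by
  intro vs
  induction vs with
  | nil => intro es; rfl
  | cons u vs ih =>
      intro es
      show pairFold F vs (vs.foldl (fun st w => F st u w) (es, bd es)) = _
      rw [foldl_lift (fun st w => F st u w) (fun es w => G es u w) bd (fun es x => h es u x) vs es]
      exact ih _

-- B's per-clause recursion is pairFold of the guardless step
theorem altClauseEdges_eq (vs : List Int) : ∀ es, altClauseEdges es vs = pairFold stepB' vs es := by
  induction vs with
  | nil => intro es; rfl
  | cons u vs ih =>
      intro es
      show altClauseEdges (vs.foldl _ es) vs = pairFold stepB' vs (vs.foldl (fun st w => stepB' st u w) es)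
      rw [ih]
      rfl

-- A's index double loop, with inner loops already converted to drop-folds, is pairFold
theorem doubleLoop_drop_eq {σ : Type} (f : σ → Int → Int → σ) :
    ∀ (vs : List Int) (st : σ),
      (PySem.List.pyRange 0 (vs.length : Int)).foldl
        (fun st i => (vs.drop (i + 1).toNat).foldl (fun st w => f st (PySem.List.pyGetD vs i 0) w) st) st
      = pairFold f vs st := by
  intro vs
  induction vs with
  | nil =>
      intro st
      rw [show ((([] : List Int)).length : Int) = 0 from rfl, PySem.List.pyRange_one_eq_nil le_rfl]
      rfl
  | cons u vs ih =>
      intro st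
      have hlen : ((u :: vs).length : Int) = (vs.length : Int) + 1 := by push_cast [List.length_cons]; ring
      rw [hlen, PySem.List.pyRange_one_cons (by positivity)]
      rw [List.foldl_cons]
      have h0 : PySem.List.pyGetD (u :: vs) 0 0 = u := by
        have h := PySem.List.pyGetD_natCast (u :: vs) 0 0
        exact_mod_cast h
      have hd0 : (u :: vs).drop ((0 : Int) + 1).toNat = vs := by norm_num
      rw [h0, hd0]
      set st' := vs.foldl (fun st w => f st u w) st with hst'
      show (PySem.List.pyRange 1 ((vs.length : Int) + 1)).foldl _ st' = pairFold f (u :: vs) st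
      have hshift :
          (PySem.List.pyRange 1 ((vs.length : Int) + 1)).foldl
            (fun st i => ((u :: vs).drop (i + 1).toNat).foldl
              (fun st w => f st (PySem.List.pyGetD (u :: vs) i 0) w) st) st'
          = (PySem.List.pyRange 0 (vs.length : Int)).foldl
            (fun st i => (vs.drop (i + 1).toNat).foldl
              (fun st w => f st (PySem.List.pyGetD vs i 0) w) st) st' := by
        rw [PySem.List.pyRange_one, PySem.List.pyRange_one]
        have e1 : ((vs.length : Int) + 1 - 1).toNat = vs.length := by omega
        have e2 : ((vs.length : Int) - 0).toNat = vs.length := by omega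
        rw [e1, e2, List.foldl_map, List.foldl_map]
        apply PySem.List.foldl_congr_mem
        intro acc k hk
        have hk' : k < vs.length := List.mem_range.mp hk
        have hg : PySem.List.pyGetD (u :: vs) (1 + (k : Int)) 0 = PySem.List.pyGetD vs (0 + (k : Int)) 0 := by
          have c1 : (1 + (k : Int)) = ((k + 1 : Nat) : Int) := by push_cast [Nat.cast_add]; ring
          have c2 : ((0 : Int) + (k : Int)) = ((k : Nat) : Int) := by push_cast; ring
          rw [c1, c2, PySem.List.pyGetD_natCast, PySem.List.pyGetD_natCast]
          simp [List.getD]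
        have hdrop : (u :: vs).drop (1 + (k : Int) + 1).toNat = vs.drop ((0 : Int) + (k : Int) + 1).toNat := by
          have c1 : (1 + (k : Int) + 1).toNat = k + 2 := by omega
          have c2 : ((0 : Int) + (k : Int) + 1).toNat = k + 1 := by omega
          rw [c1, c2, List.drop_succ_cons]
        rw [hg, hdrop]
      rw [hshift, ih st']
      rfl

-- A's literal per-clause double loop (pyRange / pyGetD) equals pairFold
theorem doubleLoop_eq {σ : Type} (f : σ → Int → Int → σ) (vs : List Int) (st : σ) :
    (PySem.List.pyRange 0 (PySem.List.len vs)).foldl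
      (fun st i => (PySem.List.pyRange (i + 1) (PySem.List.len vs)).foldl
        (fun st j => f st (PySem.List.pyGetD vs i 0) (PySem.List.pyGetD vs j 0)) st) st
    = pairFold f vs st := by
  rw [← doubleLoop_drop_eq f vs st]
  have hlen : PySem.List.len vs = (vs.length : Int) := by simp [PySem.List.len]
  rw [hlen]
  apply PySem.List.foldl_congr_mem
  intro acc i hi
  have h0i : 0 ≤ i := (PySem.List.mem_pyRange_one.mp hi).1
  have := PySem.List.foldl_pyRange_pyGetD vs 0
    (fun st w => f st (PySem.List.pyGetD vs i 0) w) acc (a := i + 1) (by omega)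
  rw [hlen] at this
  exact this

-- A's per-clause loop is pairFold of stepA
theorem buildVigClause_eq (st : PySem.Set (Int × Int) × PySem.Dict Int (PySem.Set Int))
    (clause : List (Int × Int)) :
    buildVigClause st clause = pairFold stepA (clause.map (fun lit => lit.1)) st := by
  have h := doubleLoop_eq stepA (clause.map (fun lit => lit.1)) st
  rw [← h]
  rfl

-- ----- dedup machinery: A's pair fold over the raw variable list equals B's guardless
-- ----- pair fold over the deduplicated list -----

-- membership is monotone through the inner fold
theorem mem_foldl_stepB_u (u : Int) :
    ∀ (t : List Int) (es : PySem.Set (Int × Int)) (x : Int × Int), x ∈ es →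
      x ∈ t.foldl (fun es w => stepB es u w) es := by
  intro t
  induction t with
  | nil => intro es x h; exact h
  | cons w t ih =>
      intro es x h
      apply ih
      show x ∈ stepB es u w
      unfold stepB
      split_ifs with hg
      · exact (PySem.Set.mem_add _ _ _).mpr (Or.inl h)
      · exact h

-- dropping the u != w guard = filtering the u's out of the inner list
theorem guard_filter (u : Int) :
    ∀ (t : List Int) (es : PySem.Set (Int × Int)),
      t.foldl (fun es w => stepB es u w) es
      = (t.filter (fun w => w != u)).foldl (fun es w => es.add (normPair u w)) es := by
  intro t
  induction t with
  | nil => intro es; rfl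
  | cons w t ih =>
      intro es
      by_cases hw : w = u
      · subst hw
        simp only [List.foldl_cons, List.filter_cons, bne_self_eq_false]
        rw [show stepB es w w = es by simp [stepB]]
        exact ih es
      · simp only [List.foldl_cons, List.filter_cons, bne_iff_ne]
        rw [if_pos hw, List.foldl_cons]
        rw [show stepB es u w = es.add (normPair u w) by simp [stepB, Ne.symm hw]]
        exact ih _

-- a pure-add fold skips elements whose image is already present
theorem skip_add (f : Int → Int × Int) (u : Int) :
    ∀ (t : List Int) (es : PySem.Set (Int × Int)), f u ∈ es →
      t.foldl (fun es w => es.add (f w)) es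
      = (t.filter (fun w => w != u)).foldl (fun es w => es.add (f w)) es := by
  intro t
  induction t with
  | nil => intro es _; rfl
  | cons w t ih =>
      intro es h
      by_cases hw : w = u
      · subst hw
        simp only [List.foldl_cons, List.filter_cons, bne_self_eq_false]
        rw [PySem.Set.add_of_mem h]
        exact ih es h
      · simp only [List.foldl_cons, List.filter_cons, bne_iff_ne]
        rw [if_pos hw, List.foldl_cons]
        exact ih _ ((PySem.Set.mem_add _ _ _).mpr (Or.inl h))

-- Set.add on a cons'ed accumulator, head distinct from the new element
theorem add_cons_ne (u w : Int) (s : List Int) (h : w ≠ u) :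
    PySem.Set.add (u :: s) w = u :: PySem.Set.add s w := by
  rw [PySem.Set.add_eq_ite, PySem.Set.add_eq_ite]
  by_cases hm : w ∈ s
  · rw [if_pos (List.mem_cons_of_mem u hm), if_pos hm]
  · rw [if_neg (by simp [h, hm]), if_neg hm]
    rfl

theorem foldl_add_mem_filter (u : Int) :
    ∀ (l : List Int) (s : PySem.Set Int), u ∈ s →
      l.foldl PySem.Set.add s = (l.filter (fun w => w != u)).foldl PySem.Set.add s := by
  intro l
  induction l with
  | nil => intro s _; rfl
  | cons w l ih =>
      intro s h
      by_cases hw : w = u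
      · subst hw
        simp only [List.foldl_cons, List.filter_cons, bne_self_eq_false]
        rw [PySem.Set.add_of_mem h]
        exact ih s h
      · simp only [List.foldl_cons, List.filter_cons, bne_iff_ne]
        rw [if_pos hw, List.foldl_cons]
        exact ih _ ((PySem.Set.mem_add _ _ _).mpr (Or.inl h))

theorem foldl_add_cons (u : Int) :
    ∀ (l : List Int) (s : List Int), (∀ w ∈ l, w ≠ u) →
      l.foldl PySem.Set.add (u :: s) = u :: l.foldl PySem.Set.add s := by
  intro l
  induction l with
  | nil => intro s _; rfl
  | cons w l ih =>
      intro s h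
      simp only [List.foldl_cons]
      rw [add_cons_ne u w s (h w (List.mem_cons_self))]
      exact ih _ (fun x hx => h x (List.mem_cons_of_mem w hx))

-- ofList's head/filter decomposition
theorem ofList_cons_filter (u : Int) (l : List Int) :
    PySem.Set.ofList (u :: l) = u :: PySem.Set.ofList (l.filter (fun w => w != u)) := by
  have h1 : PySem.Set.ofList (u :: l) = l.foldl PySem.Set.add [u] := by
    rw [PySem.Set.ofList_eq_foldl]
    rfl
  rw [h1, show ([u] : List Int) = u :: ([] : List Int) from rfl,
    foldl_add_mem_filter u l (u :: []) (List.mem_cons_self),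
    foldl_add_cons u _ [] (fun w hw => by
      have := List.of_mem_filter hw
      exact bne_iff_ne.mp this),
    PySem.Set.ofList_eq_foldl]

-- a pure-add fold over a list equals the same fold over its ordered dedup
theorem dedup_fold (f : Int → Int × Int) :
    ∀ (k : Nat) (l : List Int), l.length ≤ k → ∀ (es : PySem.Set (Int × Int)),
      l.foldl (fun es w => es.add (f w)) es
      = (PySem.Set.ofList l).foldl (fun es w => es.add (f w)) es := by
  intro k
  induction k with
  | zero =>
      intro l hl es
      rw [List.length_eq_zero_iff.mp (Nat.le_zero.mp hl)]
      rfl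
  | succ k ih =>
      intro l hl es
      cases l with
      | nil => rfl
      | cons w m =>
          rw [ofList_cons_filter]
          simp only [List.foldl_cons]
          rw [skip_add f w m (es.add (f w)) ((PySem.Set.mem_add _ _ _).mpr (Or.inr rfl))]
          exact ih _ (le_trans (List.length_filter_le _ m) (Nat.le_of_succ_le_succ hl)) _

-- inner fold with head u puts every normPair u w (w in t, w != u) into the result
theorem mem_innerFold (u : Int) :
    ∀ (t : List Int) (es : PySem.Set (Int × Int)) (w : Int), w ∈ t → w ≠ u →
      normPair u w ∈ t.foldl (fun es w => stepB es u w) es := by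
  intro t
  induction t with
  | nil => intro es w h _; simp at h
  | cons h t ih =>
      intro es w hw hne
      rcases List.mem_cons.mp hw with rfl | hw'
      · rw [List.foldl_cons]
        apply mem_foldl_stepB_u
        show normPair u w ∈ stepB es u w
        rw [show stepB es u w = es.add (normPair u w) by simp [stepB, Ne.symm hne]]
        exact (PySem.Set.mem_add _ _ _).mpr (Or.inr rfl)
      · rw [List.foldl_cons]
        exact ih _ w hw' hne

-- if every pair with u is already present, an inner pass headed by u is a no-op
theorem innerFold_noop (u : Int) :
    ∀ (t : List Int) (es : PySem.Set (Int × Int)),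
      (∀ w ∈ t, w ≠ u → normPair u w ∈ es) →
      t.foldl (fun es w => stepB es u w) es = es := by
  intro t
  induction t with
  | nil => intro es _; rfl
  | cons w t ih =>
      intro es h
      by_cases hw : w = u
      · subst hw
        simp only [List.foldl_cons]
        rw [show stepB es w w = es by simp [stepB]]
        exact ih es (fun x hx => h x (List.mem_cons_of_mem w hx))
      · simp only [List.foldl_cons]
        rw [show stepB es u w = es.add (normPair u w) by simp [stepB, Ne.symm hw],
          PySem.Set.add_of_mem (h w List.mem_cons_self hw)]
        exact ih es (fun x hx => h x (List.mem_cons_of_mem w hx))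

-- an inner pass headed by h skips occurrences of u once normPair u h is present
theorem innerFold_skip (h u : Int) (hne : h ≠ u) :
    ∀ (t : List Int) (es : PySem.Set (Int × Int)), normPair u h ∈ es →
      t.foldl (fun es w => stepB es h w) es
      = (t.filter (fun w => w != u)).foldl (fun es w => stepB es h w) es := by
  intro t
  induction t with
  | nil => intro es _; rfl
  | cons w t ih =>
      intro es hm
      by_cases hw : w = u
      · subst hw
        simp only [List.foldl_cons, List.filter_cons, bne_self_eq_false]
        rw [show stepB es h w = es by
          simp only [stepB, ne_eq, hne, not_false_iff, if_true]
          rw [normPair_comm h w]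
          exact PySem.Set.add_of_mem hm]
        exact ih es hm
      · simp only [List.foldl_cons, List.filter_cons, bne_iff_ne]
        rw [if_pos hw, List.foldl_cons]
        apply ih
        show normPair u h ∈ stepB es h w
        unfold stepB
        split_ifs with hg
        · exact (PySem.Set.mem_add _ _ _).mpr (Or.inl hm)
        · exact hm

-- occurrences of u beyond the first contribute nothing to the pair fold
theorem pairFold_remove (u : Int) :
    ∀ (vs : List Int) (es : PySem.Set (Int × Int)),
      (∀ w ∈ vs, w ≠ u → normPair u w ∈ es) →
      pairFold stepB vs es = pairFold stepB (vs.filter (fun w => w != u)) es := by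
  intro vs
  induction vs with
  | nil => intro es _; rfl
  | cons h t ih =>
      intro es hyp
      by_cases hh : h = u
      · subst hh
        show pairFold stepB t (t.foldl (fun es w => stepB es h w) es) = _
        rw [innerFold_noop h t es (fun w hw => hyp w (List.mem_cons_of_mem h hw))]
        simp only [List.filter_cons, bne_self_eq_false]
        exact ih es (fun w hw => hyp w (List.mem_cons_of_mem h hw))
      · simp only [List.filter_cons, bne_iff_ne]
        rw [if_pos hh]
        show pairFold stepB t (t.foldl (fun es w => stepB es h w) es)
          = pairFold stepB (t.filter (fun w => w != u))
              ((t.filter (fun w => w != u)).foldl (fun es w => stepB es h w) es)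
        rw [← innerFold_skip h u hh t es (hyp h List.mem_cons_self hh)]
        exact ih _ (fun w hw hwne =>
          mem_foldl_stepB_u h t es _ (hyp w (List.mem_cons_of_mem h hw) hwne))

-- MAIN: guarded pair fold over the raw list = guardless pair fold over its dedup
theorem pairFold_dedup :
    ∀ (k : Nat) (vs : List Int), vs.length ≤ k → ∀ (es : PySem.Set (Int × Int)),
      pairFold stepB vs es = pairFold stepB' (PySem.Set.ofList vs) es := by
  intro k
  induction k with
  | zero =>
      intro vs hvs es
      rw [List.length_eq_zero_iff.mp (Nat.le_zero.mp hvs)]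
      rfl
  | succ k ih =>
      intro vs hvs es
      cases vs with
      | nil => rfl
      | cons u t =>
          rw [ofList_cons_filter]
          have ht' : (t.filter (fun w => w != u)).length ≤ k :=
            le_trans (List.length_filter_le _ t) (Nat.le_of_succ_le_succ hvs)
          have hinner :
              t.foldl (fun es w => stepB es u w) es
              = (PySem.Set.ofList (t.filter (fun w => w != u))).foldl
                  (fun es w => stepB' es u w) es := by
            rw [guard_filter u t es,
              dedup_fold (fun w => normPair u w) k _ ht' es]
            rfl
          show pairFold stepB t (t.foldl (fun es w => stepB es u w) es)
            = pairFold stepB' (PySem.Set.ofList (t.filter (fun w => w != u)))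
                ((PySem.Set.ofList (t.filter (fun w => w != u))).foldl
                  (fun es w => stepB' es u w) es)
          rw [← hinner]
          rw [pairFold_remove u t _ (fun w hw hwne => mem_innerFold u t es w hw hwne)]
          exact ih _ ht' _

-- ===== VERDICT (by name: the statement is the Claim_ definition above) =====
theorem build_vig_spec : Claim_equal_build_vig := by
  intro n clauses _
  show build_vig n clauses = build_vig_alt n clauses
  have hA : clauses.foldl buildVigClause (PySem.Set.empty, PySem.Dict.empty)
      = clauses.foldl (fun st clause => pairFold stepA (clause.map (fun lit => lit.1)) st)
          (PySem.Set.empty, PySem.Dict.empty) := by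
    apply PySem.List.foldl_congr_mem
    intro acc clause _
    exact buildVigClause_eq acc clause
  have hB : clauses.foldl
        (fun es clause => altClauseEdges es (PySem.List.dedup (clause.map (fun lit => lit.1))))
        PySem.Set.empty
      = clauses.foldl (fun es clause => pairFold stepB (clause.map (fun lit => lit.1)) es)
          PySem.Set.empty := by
    apply PySem.List.foldl_congr_mem
    intro acc clause _
    rw [altClauseEdges_eq, PySem.List.dedup_eq_ofList]
    exact (pairFold_dedup (clause.map (fun lit => lit.1)).length _ le_rfl acc).symm
  have key : clauses.foldl (fun st clause => pairFold stepA (clause.map (fun lit => lit.1)) st)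
        (PySem.Set.empty, PySem.Dict.empty)
      = (clauses.foldl (fun es clause => pairFold stepB (clause.map (fun lit => lit.1)) es) PySem.Set.empty,
         buildAdj (clauses.foldl (fun es clause => pairFold stepB (clause.map (fun lit => lit.1)) es) PySem.Set.empty)) :=
    foldl_lift _ _ buildAdj
      (fun es clause => pairFold_lift stepA stepB buildAdj step_coherent (clause.map (fun lit => lit.1)) es)
      clauses PySem.Set.empty
  show ((clauses.foldl buildVigClause (PySem.Set.empty, PySem.Dict.empty)).1,
        (clauses.foldl buildVigClause (PySem.Set.empty, PySem.Dict.empty)).2.items)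
      = ((clauses.foldl (fun es clause => altClauseEdges es (PySem.List.dedup (clause.map (fun lit => lit.1)))) PySem.Set.empty),
         ((clauses.foldl (fun es clause => altClauseEdges es (PySem.List.dedup (clause.map (fun lit => lit.1)))) PySem.Set.empty).foldl
            adjInsert PySem.Dict.empty).items)
  rw [hA, key, hB]
  rfl
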